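-- pv_equiv track=rewrite | github.com/Melody-coder923/Leetcode-Practice | 2237-count-positions-on-street-with-required-brightness/2237-count-positions-on-street-with-required-brightness.py | meetRequirement
-- ===== SOURCE A (Python) =====
-- from typing import List
--
-- def meetRequirement(n: int, lights: List[List[int]], requirement: List[int]) -> int:
--     #差分数组
--     diff = [0] * (n + 1)
--     # 差分标记每盏灯照亮的区间,每盏灯照亮一段区间
--     for pos, r in lights:
--         #防止照亮范围超出左边界
--         left = max(0, pos - r)
--         #防止照亮范围超出右边界
--         right = min(n - 1, pos + r)
--         diff[left] += 1
--         if right + 1 < n: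
--             #防止数组越界，因为 diff[right+1] 可能超出范围
--             diff[right + 1] -= 1
--     # 通过前缀和恢复亮度 [1:3]
--     #diff = [0, 1, 0, 0, -1]
--     #presum
--     #brightness = [0, 1, 1, 1, 0]
--     brightness = [0] * n
--     brightness[0] = diff[0]
--     for i in range(1, n):
--         brightness[i] = brightness[i - 1] + diff[i]
--
--     # 统计满足条件的点
--     ans = sum(brightness[i] >= requirement[i] for i in range(n))
--     return ans
-- ===== SOURCE B (Python) =====
-- def meetRequirement(n, lights, requirement):
--     # direct counting over precomputed clamped intervals: no difference array, no prefix pass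
--     intervals = [(max(0, pos - r), min(n - 1, pos + r)) for pos, r in lights]
--     ans = 0
--     for i in range(n):
--         cnt = sum(1 for lo, hi in intervals if lo <= i <= hi)
--         if cnt >= requirement[i]:
--             ans += 1
--     return ans
-- ===== Notes on version B (the rewrite author's own statement) =====
-- stated objective: simpler
-- what changed: Replaces the difference-array + prefix-sum passes by directly counting, for each position i, the lights whose clamped interval [max(0,pos-r), min(n-1,pos+r)] covers i; Pre_ excludes malformed lights (negative radius, or interval entirely off the street) on which A's diff updates hit negative list indices that wrap around, and inputs where A raises (n<=0, short requirement, diff index out of range).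
-- outside the precondition, e.g. on meetRequirement(2, [[0, -1]], [0, 0]): A returns 1, B returns 2; on meetRequirement(1, [[-3, 1]], [1]): A returns 1, B returns 0
-- crash fix: On n <= 0 (and on well-shaped inputs containing a light with pos-r > n or pos+r < -(n+2)) A raises IndexError while B simply counts nothing out of range and returns the number of positions whose requirement is met (0 when n <= 0). — e.g. on meetRequirement(0, [], []): A raises IndexError, B returns 0
import Mathlib
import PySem

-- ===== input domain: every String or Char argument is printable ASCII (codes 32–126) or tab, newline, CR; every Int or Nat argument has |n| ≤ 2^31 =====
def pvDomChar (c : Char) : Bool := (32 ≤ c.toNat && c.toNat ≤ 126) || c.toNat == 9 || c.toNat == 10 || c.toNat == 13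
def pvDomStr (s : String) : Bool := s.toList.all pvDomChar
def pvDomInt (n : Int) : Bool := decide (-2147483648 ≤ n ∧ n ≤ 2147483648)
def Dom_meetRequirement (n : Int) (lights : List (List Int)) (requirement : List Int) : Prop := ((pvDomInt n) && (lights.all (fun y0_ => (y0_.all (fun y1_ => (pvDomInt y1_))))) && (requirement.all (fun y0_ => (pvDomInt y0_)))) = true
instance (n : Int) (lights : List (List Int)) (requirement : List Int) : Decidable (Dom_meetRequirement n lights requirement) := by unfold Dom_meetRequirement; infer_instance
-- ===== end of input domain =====

-- B replaces A's difference-array + prefix-sum passes by a direct per-position count of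
-- covering lights (simpler, not faster); Pre_ restricts to the problem's natural domain
-- (n ≥ 1, requirement long enough, well-formed lights) — outside it A raises or its diff
-- indexing wraps negative indices.


-- ===== PORT A =====
-- one light's diff-array update: diff[left] += 1; if right+1 < n: diff[right+1] -= 1
def pvStepLight (n : Int) (d : List Int) (l : List Int) : List Int :=
  match l with
  | [pos, r] =>
    let left := max 0 (pos - r)
    let right := min (n - 1) (pos + r)
    let d1 := PySem.List.pySetD d left (PySem.List.pyGetD d left 0 + 1)
    if right + 1 < n then
      PySem.List.pySetD d1 (right + 1) (PySem.List.pyGetD d1 (right + 1) 0 + (-1))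
    else d1
  | _ => d  -- Python raises ValueError here (unpacking); excluded by Pre_

def meetRequirement (n : Int) (lights : List (List Int)) (requirement : List Int) : Int :=
  let diff := lights.foldl (pvStepLight n) (List.replicate (n + 1).toNat 0)
  let b0 := PySem.List.pySetD (List.replicate n.toNat (0 : Int)) 0 (PySem.List.pyGetD diff 0 0)
  let brightness := (PySem.List.pyRange 1 n 1).foldl
    (fun b i => PySem.List.pySetD b i (PySem.List.pyGetD b (i - 1) 0 + PySem.List.pyGetD diff i 0)) b0
  (PySem.List.pyRange 0 n 1).foldl
    (fun a i => a + (if PySem.List.pyGetD brightness i 0 ≥ PySem.List.pyGetD requirement i 0 then 1 else 0)) 0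

-- ===== PORT B =====
def meetRequirement_alt (n : Int) (lights : List (List Int)) (requirement : List Int) : Int :=
  let intervals := lights.map (fun l =>
    match l with
    | [pos, r] => (max 0 (pos - r), min (n - 1) (pos + r))
    | _ => ((0 : Int), (-1 : Int)))  -- Python raises ValueError here (unpacking); excluded by Pre_
  (PySem.List.pyRange 0 n 1).foldl
    (fun ans i =>
      let cnt := intervals.foldl (fun c p => if p.1 ≤ i ∧ i ≤ p.2 then c + 1 else c) (0 : Int)
      if cnt ≥ PySem.List.pyGetD requirement i 0 then ans + 1 else ans) 0

-- ===== PRECONDITION & SPEC =====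
-- Pre_ is the problem's natural domain: n ≥ 1, requirement covers the street, and every
-- light is a well-formed pair whose beam is not entirely left of the street (0 ≤ pos+r),
-- has nonnegative radius, and starts on the board (pos-r ≤ n).  It EXCLUDES inputs on
-- which A raises (n ≤ 0, requirement shorter than n, a non-pair light, pos-r > n or
-- pos+r < -(n+2), all IndexError/ValueError) and malformed lights with r < 0 or
-- pos+r < 0, on which A still returns but its value is an accident of Python's
-- negative-index wraparound in the diff array (see cites).
def Pre_meetRequirement (n : Int) (lights : List (List Int)) (requirement : List Int) : Prop :=
  1 ≤ n ∧ n ≤ (requirement.length : Int) ∧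
  ∀ l ∈ lights, l.length = 2 ∧ 0 ≤ l.getD 1 0 ∧ 0 ≤ l.getD 0 0 + l.getD 1 0 ∧ l.getD 0 0 - l.getD 1 0 ≤ n
instance (n : Int) (lights : List (List Int)) (requirement : List Int) : Decidable (Pre_meetRequirement n lights requirement) := by unfold Pre_meetRequirement; infer_instance

def pvWitness_meetRequirement : Int × List (List Int) × List Int := (2, [[0, 1], [1, 0]], [1, 2])

-- On n ≤ 0, and on well-shaped inputs containing a light with pos-r > n or pos+r < -(n+2),
-- A raises IndexError while B counts nothing out of range and returns the number of
-- positions whose requirement is met (0 when n ≤ 0).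
def Raises_meetRequirement (n : Int) (lights : List (List Int)) (requirement : List Int) : Prop :=
  (n ≤ 0 ∧ ∀ l ∈ lights, l.length = 2) ∨
  (1 ≤ n ∧ n ≤ (requirement.length : Int) ∧ (∀ l ∈ lights, l.length = 2) ∧
    ∃ l ∈ lights, n < l.getD 0 0 - l.getD 1 0 ∨ l.getD 0 0 + l.getD 1 0 < -(n + 2))
instance (n : Int) (lights : List (List Int)) (requirement : List Int) : Decidable (Raises_meetRequirement n lights requirement) := by unfold Raises_meetRequirement; infer_instance
def pvRaiseWitness_meetRequirement : Int × List (List Int) × List Int := (0, [], [])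
def pvRaiseWitnessOut_meetRequirement : Int := 0

def Spec_meetRequirement (n : Int) (lights : List (List Int)) (requirement : List Int) (out : Int) : Prop := out = meetRequirement_alt n lights requirement
instance (n : Int) (lights : List (List Int)) (requirement : List Int) (out : Int) : Decidable (Spec_meetRequirement n lights requirement out) := by unfold Spec_meetRequirement; infer_instance

-- ===== CLAIM (what is proved, stated in full; the proofs are below) =====
def Claim_equal_meetRequirement : Prop := ∀ (n : Int) (lights : List (List Int)) (requirement : List Int), Dom_meetRequirement n lights requirement → Pre_meetRequirement n lights requirement → Spec_meetRequirement n lights requirement (meetRequirement n lights requirement)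

def Claim_raises_meetRequirement : Prop := (∀ (n : Int) (lights : List (List Int)) (requirement : List Int), Dom_meetRequirement n lights requirement → Raises_meetRequirement n lights requirement → ¬ Pre_meetRequirement n lights requirement) ∧ (Dom_meetRequirement (pvRaiseWitness_meetRequirement.1) (pvRaiseWitness_meetRequirement.2.1) (pvRaiseWitness_meetRequirement.2.2) ∧ Raises_meetRequirement (pvRaiseWitness_meetRequirement.1) (pvRaiseWitness_meetRequirement.2.1) (pvRaiseWitness_meetRequirement.2.2) ∧ meetRequirement_alt (pvRaiseWitness_meetRequirement.1) (pvRaiseWitness_meetRequirement.2.1) (pvRaiseWitness_meetRequirement.2.2) = pvRaiseWitnessOut_meetRequirement)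

-- ===== LEMMAS AND PROOFS =====

-- does light l cover position i?  max(0,pos-r) <= i <= min(n-1,pos+r)
def pvCovers (n : Int) (l : List Int) (i : Int) : Bool :=
  match l with
  | [pos, r] => decide (max 0 (pos - r) ≤ i ∧ i ≤ min (n - 1) (pos + r))
  | _ => false

-- good light: the per-light clause of Pre_
def pvGood (n : Int) (l : List Int) : Prop :=
  l.length = 2 ∧ 0 ≤ l.getD 1 0 ∧ 0 ≤ l.getD 0 0 + l.getD 1 0 ∧ l.getD 0 0 - l.getD 1 0 ≤ n

-- prefix sum of the first i+1 entries of the diff array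
def pvPre (d : List Int) (i : Int) : Int := (d.take (i + 1).toNat).sum

theorem pvStepLight_length (n : Int) (d l : List Int) :
    (pvStepLight n d l).length = d.length := by
  unfold pvStepLight
  rcases l with _ | ⟨a, _ | ⟨b, _ | ⟨c, t⟩⟩⟩ <;>
    simp only [] <;> (try split) <;> simp [PySem.List.length_pySetD]

theorem pvSum_take_set_add (d : List Int) (k : Nat) (v : Int) (m : Nat) (hk : k < d.length) :
    ((d.set k (d[k] + v)).take m).sum = (d.take m).sum + if k < m then v else 0 := by
  induction d generalizing k m with
  | nil => simp at hk
  | cons x xs ih =>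
    cases k with
    | zero =>
      cases m with
      | zero => simp
      | succ m => simp [List.take_succ_cons]; ring
    | succ k =>
      cases m with
      | zero => simp
      | succ m =>
        simp only [List.set_cons_succ, List.take_succ_cons, List.sum_cons, List.getElem_cons_succ]
        rw [ih k m (by simpa using hk)]
        simp only [Nat.succ_lt_succ_iff]
        ring

theorem pvPre_pySetD_add (d : List Int) (k i v : Int)
    (h0 : 0 ≤ k) (hk : k < (d.length : Int)) (hi : 0 ≤ i) :
    pvPre (PySem.List.pySetD d k (PySem.List.pyGetD d k 0 + v)) i
      = pvPre d i + if k ≤ i then v else 0 := by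
  have hkn : k.toNat < d.length := by omega
  rw [PySem.List.pySetD_of_nonneg _ _ h0, PySem.List.pyGetD_eq_getElem _ _ h0 hk]
  unfold pvPre
  rw [pvSum_take_set_add d k.toNat v (i + 1).toNat hkn]
  congr 1
  split <;> split <;> first | rfl | omega

theorem pvPre_step (n : Int) (d l : List Int) (i : Int)
    (hn : 1 ≤ n) (hd : (d.length : Int) = n + 1) (hg : pvGood n l)
    (hi0 : 0 ≤ i) (hin : i < n) :
    pvPre (pvStepLight n d l) i = pvPre d i + (if pvCovers n l i then 1 else 0) := by
  obtain ⟨hlen, hr, hpr, hpl⟩ := hg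
  rcases l with _ | ⟨pos, _ | ⟨r, _ | ⟨c, t⟩⟩⟩ <;> simp at hlen
  simp only [List.getD_cons_zero, List.getD_cons_succ] at hr hpr hpl
  have hL0 : (0:Int) ≤ max 0 (pos - r) := le_max_left 0 _
  have hLn : max 0 (pos - r) < (d.length : Int) := by omega
  have hpre1 := pvPre_pySetD_add d (max 0 (pos - r)) i 1 hL0 hLn hi0
  have hd1 : ((PySem.List.pySetD d (max 0 (pos - r))
      (PySem.List.pyGetD d (max 0 (pos - r)) 0 + 1)).length : Int) = n + 1 := by
    rw [PySem.List.length_pySetD]; exact hd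
  have hR0 : (0:Int) ≤ min (n - 1) (pos + r) := by omega
  have hcov : pvCovers n [pos, r] i
      = decide (max 0 (pos - r) ≤ i ∧ i ≤ min (n - 1) (pos + r)) := rfl
  by_cases hb : min (n - 1) (pos + r) + 1 < n
  · have hpre2 := pvPre_pySetD_add
      (PySem.List.pySetD d (max 0 (pos - r)) (PySem.List.pyGetD d (max 0 (pos - r)) 0 + 1))
      (min (n - 1) (pos + r) + 1) i (-1) (by omega) (by rw [hd1]; omega) hi0
    simp only [pvStepLight, hb, if_true]
    rw [hpre2, hpre1, hcov]
    by_cases h1 : max 0 (pos - r) ≤ i <;>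
      by_cases h2 : min (n - 1) (pos + r) + 1 ≤ i <;>
        by_cases h3 : i ≤ min (n - 1) (pos + r) <;>
          simp [h1, h2, h3] <;> omega
  · simp only [pvStepLight, hb, if_false]
    rw [hpre1, hcov]
    have hio : i ≤ min (n - 1) (pos + r) := by omega
    by_cases h1 : max 0 (pos - r) ≤ i <;> simp [h1, hio]

theorem pvFoldl_length (n : Int) (lights : List (List Int)) (d : List Int) :
    (lights.foldl (pvStepLight n) d).length = d.length := by
  induction lights generalizing d with
  | nil => rfl
  | cons l ls ih => rw [List.foldl_cons, ih, pvStepLight_length]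

theorem pvPre_foldl (n : Int) (lights : List (List Int)) (d : List Int) (i : Int)
    (hn : 1 ≤ n) (hd : (d.length : Int) = n + 1)
    (hg : ∀ l ∈ lights, pvGood n l) (hi0 : 0 ≤ i) (hin : i < n) :
    pvPre (lights.foldl (pvStepLight n) d) i
      = pvPre d i + (lights.countP (fun l => pvCovers n l i) : Int) := by
  induction lights generalizing d with
  | nil => simp
  | cons l ls ih =>
    rw [List.foldl_cons]
    rw [ih _ (by rw [pvStepLight_length]; exact hd) (fun x hx => hg x (by simp [hx]))]
    rw [pvPre_step n d l i hn hd (hg l (by simp)) hi0 hin]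
    rw [List.countP_cons]
    by_cases h : pvCovers n l i <;> simp [h] <;> ring

theorem pvPre_replicate (m : Nat) (i : Int) : pvPre (List.replicate m (0 : Int)) i = 0 := by
  unfold pvPre
  simp

theorem pvSum_take_succ (d : List Int) (m : Nat) (hm : m < d.length) :
    (d.take (m + 1)).sum = (d.take m).sum + d.getD m 0 := by
  induction d generalizing m with
  | nil => simp at hm
  | cons x xs ih =>
    cases m with
    | zero => simp
    | succ m =>
      simp only [List.take_succ_cons, List.sum_cons, List.getD_cons_succ]
      rw [ih m (by simpa using hm)]
      ring

theorem pvPre_succ (d : List Int) (i : Int) (hi : 0 ≤ i) (hin : i < (d.length : Int)) :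
    pvPre d i = pvPre d (i - 1) + PySem.List.pyGetD d i 0 := by
  unfold pvPre
  have h1 : (i + 1).toNat = i.toNat + 1 := by omega
  have h2 : (i - 1 + 1).toNat = i.toNat := by omega
  rw [h1, h2, pvSum_take_succ d i.toNat (by omega),
      PySem.List.pyGetD_eq_getElem _ _ hi hin]
  simp [List.getD_eq_getElem?_getD, List.getElem?_eq_getElem (by omega : i.toNat < d.length)]

theorem pvPre_zero_eq (d : List Int) (hd : d ≠ []) :
    pvPre d 0 = PySem.List.pyGetD d 0 0 := by
  rcases d with _ | ⟨x, xs⟩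
  · simp at hd
  · simp [pvPre, PySem.List.pyGetD_zero]

-- pyGetD of a set at a different in-range index is unchanged
theorem pvGetD_set_ne (b : List Int) (m i : Int) (w : Int)
    (hm0 : 0 ≤ m) (hmn : m < (b.length : Int)) (hi0 : 0 ≤ i) (hin : i < (b.length : Int))
    (hne : i ≠ m) :
    PySem.List.pyGetD (PySem.List.pySetD b m w) i 0 = PySem.List.pyGetD b i 0 := by
  rw [PySem.List.pySetD_of_nonneg _ _ hm0,
      PySem.List.pyGetD_eq_getElem _ _ hi0 (by simpa using hin),
      PySem.List.pyGetD_eq_getElem _ _ hi0 hin]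
  rw [List.getElem_set_ne (by omega)]

theorem pvGetD_set_self (b : List Int) (m : Int) (w : Int)
    (hm0 : 0 ≤ m) (hmn : m < (b.length : Int)) :
    PySem.List.pyGetD (PySem.List.pySetD b m w) m 0 = w := by
  rw [PySem.List.pySetD_of_nonneg _ _ hm0,
      PySem.List.pyGetD_eq_getElem _ _ hm0 (by simp; omega)]
  simp

-- invariant of A's prefix-sum (brightness) loop
theorem pvBright (diff : List Int) (n : Int) (hn : 1 ≤ n) (hdl : (diff.length : Int) = n + 1)
    (j : Nat) (hj : 1 + (j : Int) ≤ n) :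
    ((PySem.List.pyRange 1 (1 + (j : Int)) 1).foldl
        (fun b i => PySem.List.pySetD b i
          (PySem.List.pyGetD b (i - 1) 0 + PySem.List.pyGetD diff i 0))
        (PySem.List.pySetD (List.replicate n.toNat (0 : Int)) 0
          (PySem.List.pyGetD diff 0 0))).length = n.toNat ∧
    ∀ i : Int, 0 ≤ i → i < 1 + (j : Int) →
      PySem.List.pyGetD ((PySem.List.pyRange 1 (1 + (j : Int)) 1).foldl
        (fun b i => PySem.List.pySetD b i
          (PySem.List.pyGetD b (i - 1) 0 + PySem.List.pyGetD diff i 0))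
        (PySem.List.pySetD (List.replicate n.toNat (0 : Int)) 0
          (PySem.List.pyGetD diff 0 0))) i 0 = pvPre diff i := by
  induction j with
  | zero =>
    rw [show (1 + ((0 : Nat) : Int)) = 1 by norm_num, PySem.List.pyRange_one_eq_nil (by omega)]
    simp only [List.foldl_nil]
    constructor
    · rw [PySem.List.length_pySetD, List.length_replicate]
    · intro i hi0 hi1
      have hi : i = 0 := by omega
      subst hi
      rw [pvGetD_set_self _ 0 _ (by omega) (by simp [List.length_replicate]; omega)]
      rw [pvPre_zero_eq diff (by intro h; rw [h] at hdl; simp at hdl; omega)]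
  | succ j ih =>
    have hj' : 1 + (j : Int) ≤ n := by push_cast at hj ⊢; omega
    obtain ⟨ihlen, ihval⟩ := ih hj'
    have hsplit : PySem.List.pyRange 1 (1 + ((j + 1 : Nat) : Int)) 1
        = PySem.List.pyRange 1 (1 + (j : Int)) 1 ++ [1 + (j : Int)] := by
      push_cast
      rw [show (1 + ((j : Int) + 1)) = (1 + (j : Int)) + 1 by ring]
      exact PySem.List.pyRange_one_succ_right (by omega)
    rw [hsplit, List.foldl_append, List.foldl_cons, List.foldl_nil]
    set bk := (PySem.List.pyRange 1 (1 + (j : Int)) 1).foldl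
        (fun b i => PySem.List.pySetD b i
          (PySem.List.pyGetD b (i - 1) 0 + PySem.List.pyGetD diff i 0))
        (PySem.List.pySetD (List.replicate n.toNat (0 : Int)) 0
          (PySem.List.pyGetD diff 0 0)) with hbk
    have hbkl : (bk.length : Int) = n := by rw [ihlen]; omega
    constructor
    · rw [PySem.List.length_pySetD]; exact ihlen
    · intro i hi0 hi1
      by_cases hie : i = 1 + (j : Int)
      · subst hie
        rw [pvGetD_set_self _ _ _ (by omega) (by omega)]
        rw [ihval (1 + (j : Int) - 1) (by omega) (by omega)]
        rw [pvPre_succ diff (1 + (j : Int)) (by omega) (by omega)]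
      · rw [pvGetD_set_ne _ _ _ _ (by omega) (by omega) hi0 (by push_cast at hi1 ⊢; omega) hie]
        exact ihval i hi0 (by push_cast at hi1 ⊢; omega)


-- ===== VERDICT (by name: the statement is the Claim_ definition above) =====
theorem meetRequirement_spec : Claim_equal_meetRequirement := by
  intro n lights requirement _ hp
  obtain ⟨hn, hreq, hl⟩ := hp
  unfold Spec_meetRequirement meetRequirement meetRequirement_alt
  have hdl : ((lights.foldl (pvStepLight n) (List.replicate (n + 1).toNat 0)).length : Int)
      = n + 1 := by rw [pvFoldl_length]; simp; omega
  set diff := lights.foldl (pvStepLight n) (List.replicate (n + 1).toNat 0) with hdiff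
  have hjn : 1 + (((n - 1).toNat : Nat) : Int) = n := by omega
  obtain ⟨_, hval⟩ := pvBright diff n hn hdl (n - 1).toNat (by omega)
  rw [hjn] at hval
  apply PySem.List.foldl_congr_mem
  intro acc i hi
  rw [PySem.List.mem_pyRange_one] at hi
  rw [hval i hi.1 hi.2]
  rw [hdiff, pvPre_foldl n lights _ i hn (by simp; omega)
        (fun l hlm => (by exact hl l hlm : pvGood n l)) hi.1 hi.2,
      pvPre_replicate]
  dsimp only
  rw [PySem.List.foldl_ite_add_one, List.countP_map]
  have hc : lights.countP ((fun p : Int × Int => decide (p.1 ≤ i ∧ i ≤ p.2)) ∘ fun l =>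
      match l with
      | [pos, r] => (max 0 (pos - r), min (n - 1) (pos + r))
      | _ => ((0 : Int), (-1 : Int)))
      = lights.countP (fun l => pvCovers n l i) := by
    apply List.countP_congr
    intro l _
    rcases l with _ | ⟨pos, _ | ⟨r, _ | ⟨c, t⟩⟩⟩ <;>
      simp [pvCovers] <;> omega
  rw [hc]
  simp only [Int.zero_add]
  split <;> ring

theorem meetRequirement_raises : Claim_raises_meetRequirement := by
  unfold Claim_raises_meetRequirement
  constructor
  · intro n lights requirement _ hr hp
    obtain ⟨hn, hreq, hl⟩ := hp
    rcases hr with ⟨h, _⟩ | ⟨_, _, _, l, hlm, hbad⟩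
    · omega
    · obtain ⟨_, h1, h2, h3⟩ := hl l hlm
      omega
  · exact ⟨by decide, by left; decide, by decide⟩

-- witness self-check: the crash-fix witness really lies in the region and B's port returns the stated literal there
theorem pvRaiseWitness_ok :
    Raises_meetRequirement (pvRaiseWitness_meetRequirement.1) (pvRaiseWitness_meetRequirement.2.1)
        (pvRaiseWitness_meetRequirement.2.2) ∧
      meetRequirement_alt (pvRaiseWitness_meetRequirement.1) (pvRaiseWitness_meetRequirement.2.1)
        (pvRaiseWitness_meetRequirement.2.2) = pvRaiseWitnessOut_meetRequirement :=
  ⟨meetRequirement_raises.2.2.1, meetRequirement_raises.2.2.2⟩
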